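-- pv_equiv track=rewrite | github.com/MikaKlepper/oaks_project | pipeline/split.py | evaluate_partition
-- ===== SOURCE A (Python) =====
-- from collections import Counter
--
-- def evaluate_partition(A, B):
--     """
--     Computes imbalance between two splits.
--     """
--     count_A, count_B = Counter(), Counter()
--
--     for _, (abn_list) in A:
--         count_A.update(f"abn_{h}" for h in abn_list)
--
--     for _, (abn_list) in B:
--         count_B.update(f"abn_{h}" for h in abn_list)
--
--     return sum(
--         abs(count_A[label] - count_B[label])
--         for label in set(count_A) | set(count_B)
--     )
-- ===== SOURCE B (Python) =====
-- def evaluate_partition(A, B):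
--     """
--     Computes imbalance between two splits.
--     """
--     pool = []
--     for _, abn_list in A:
--         pool.extend(abn_list)
--     imbalance = 0
--     for _, abn_list in B:
--         for h in abn_list:
--             if h in pool:
--                 pool.remove(h)
--             else:
--                 imbalance += 1
--     return imbalance + len(pool)
-- ===== Notes on version B (the rewrite author's own statement) =====
-- stated objective: alternative
-- what changed: B replaces counting tables entirely by multiset cancellation: it pools all of A's abnormality ids into one list, then matches each id from B against the pool (removing one occurrence or counting an unmatched one), returning unmatched + leftovers; no Counter, no label strings, no key-set union.
import Mathlib
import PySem

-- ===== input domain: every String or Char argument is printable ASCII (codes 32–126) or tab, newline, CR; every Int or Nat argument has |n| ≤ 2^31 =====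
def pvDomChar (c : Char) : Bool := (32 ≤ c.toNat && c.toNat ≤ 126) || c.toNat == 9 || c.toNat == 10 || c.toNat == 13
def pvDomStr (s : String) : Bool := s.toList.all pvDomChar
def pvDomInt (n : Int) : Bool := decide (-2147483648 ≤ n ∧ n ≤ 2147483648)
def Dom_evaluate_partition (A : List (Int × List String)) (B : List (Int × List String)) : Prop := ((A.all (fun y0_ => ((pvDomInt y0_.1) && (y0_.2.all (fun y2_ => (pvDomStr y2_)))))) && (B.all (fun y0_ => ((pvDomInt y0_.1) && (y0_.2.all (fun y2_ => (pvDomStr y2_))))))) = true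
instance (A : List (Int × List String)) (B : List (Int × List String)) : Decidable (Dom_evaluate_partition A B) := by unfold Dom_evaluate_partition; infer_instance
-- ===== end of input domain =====

-- B computes the same imbalance by multiset cancellation (pool A's ids, match B's ids
-- against the pool, count unmatched plus leftovers) instead of two Counters and a
-- key-union sum (objective: alternative; B is quadratic where A is linear).

-- ===== PORT A =====
def evaluate_partition (A : List (Int × List String)) (B : List (Int × List String)) : Int :=
  let count_A := A.foldl (fun d p =>
    (p.2.map (fun h => "abn_" ++ h)).foldl (fun d lbl => d.modify lbl 0 (fun c => c + 1)) d)
    PySem.Dict.empty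
  let count_B := B.foldl (fun d p =>
    (p.2.map (fun h => "abn_" ++ h)).foldl (fun d lbl => d.modify lbl 0 (fun c => c + 1)) d)
    PySem.Dict.empty
  ((PySem.Set.union (PySem.Set.ofList count_A.keys) (PySem.Set.ofList count_B.keys)).map
    (fun label => |count_A.getD label 0 - count_B.getD label 0|)).sum

-- ===== PORT B =====
def evaluate_partition_alt (A : List (Int × List String)) (B : List (Int × List String)) : Int :=
  let pool := A.foldl (fun pool p => pool ++ p.2) ([] : List String)
  let st := B.foldl (fun st p =>
    p.2.foldl (fun (st : Int × List String) h =>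
      if h ∈ st.2 then (st.1, st.2.erase h) else (st.1 + 1, st.2)) st) ((0 : Int), pool)
  st.1 + (st.2.length : Int)

-- ===== PRECONDITION & SPEC =====
def Spec_evaluate_partition (A : List (Int × List String)) (B : List (Int × List String)) (out : Int) : Prop := out = evaluate_partition_alt A B
instance (A : List (Int × List String)) (B : List (Int × List String)) (out : Int) : Decidable (Spec_evaluate_partition A B out) := by unfold Spec_evaluate_partition; infer_instance

-- ===== CLAIM (what is proved, stated in full; the proofs are below) =====
def Claim_equal_evaluate_partition : Prop := ∀ (A : List (Int × List String)) (B : List (Int × List String)), Dom_evaluate_partition A B → Spec_evaluate_partition A B (evaluate_partition A B)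

-- ===== LEMMAS AND PROOFS =====

-- the raw flattened id list of a split, and its "abn_"-prefixed label list
def pvRaw (L : List (Int × List String)) : List String := L.flatMap (fun p => p.2)
def pvLabels (L : List (Int × List String)) : List String :=
  L.flatMap (fun p => p.2.map (fun h => "abn_" ++ h))

-- A's outer counting fold, named so lemmas can target it
def pvPlus (L : List (Int × List String)) (d : PySem.Dict String Int) : PySem.Dict String Int :=
  L.foldl (fun d p =>
    (p.2.map (fun h => "abn_" ++ h)).foldl (fun d lbl => d.modify lbl 0 (fun c => c + 1)) d) d

-- B's matching step, named so lemmas can target it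
def pvStep (st : Int × List String) (h : String) : Int × List String :=
  if h ∈ st.2 then (st.1, st.2.erase h) else (st.1 + 1, st.2)

theorem pv_getD_plus (L : List (Int × List String)) (d : PySem.Dict String Int) (v : String) :
    (pvPlus L d).getD v 0 = d.getD v 0 + ((pvLabels L).count v : Int) := by
  induction L generalizing d with
  | nil => simp [pvPlus, pvLabels]
  | cons p L ih =>
    simp only [pvPlus, List.foldl_cons] at ih ⊢
    rw [ih, PySem.Dict.getD_foldl_modify_add_one]
    simp only [pvLabels, List.flatMap_cons, List.count_append]
    push_cast; ring

theorem pv_keys_plus (L : List (Int × List String)) (d : PySem.Dict String Int) :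
    (pvPlus L d).keys = PySem.Set.update d.keys (pvLabels L) := by
  induction L generalizing d with
  | nil => simp [pvPlus, pvLabels, PySem.Set.update_nil]
  | cons p L ih =>
    simp only [pvPlus, List.foldl_cons] at ih ⊢
    rw [ih, PySem.Dict.keys_foldl_modify (f := fun _ _ => fun c => c + 1)]
    simp [pvLabels, List.flatMap_cons, PySem.Set.update_append]

-- sum of a map over a duplicate-free list as a Finset sum
theorem pv_sum_map_nodup (l : List String) (hl : l.Nodup) (f : String → Int) :
    (l.map f).sum = ∑ v ∈ l.toFinset, f v := by
  induction l with
  | nil => simp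
  | cons x l ih =>
    rcases List.nodup_cons.mp hl with ⟨hx, hl'⟩
    simp only [List.map_cons, List.sum_cons, List.toFinset_cons]
    rw [Finset.sum_insert (by simpa using hx), ih hl']

-- prefixing is injective
theorem pv_prefix_inj : Function.Injective (fun h : String => "abn_" ++ h) := by
  intro a b hab
  have h1 : ("abn_" ++ a).toList = ("abn_" ++ b).toList := congrArg String.toList hab
  simp only [String.toList_append] at h1
  have h2 := List.append_cancel_left h1
  exact String.toList_injective h2

-- A's value as a Finset sum over the raw (unprefixed) ids
theorem pv_A_sum (A B : List (Int × List String)) :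
    evaluate_partition A B
      = ∑ v ∈ (pvRaw A ++ pvRaw B).toFinset,
          |((pvRaw A).count v : Int) - ((pvRaw B).count v : Int)| := by
  have hlab : ∀ L, pvLabels L = (pvRaw L).map (fun h => "abn_" ++ h) := by
    intro L; simp [pvLabels, pvRaw, List.map_flatMap]
  -- the union list
  set la := pvLabels A with hla
  set lb := pvLabels B with hlb
  have hkA : (pvPlus A PySem.Dict.empty).keys = PySem.Set.ofList la := by
    rw [pv_keys_plus, PySem.Dict.keys_empty, PySem.Set.update_nil_left]
  have hkB : (pvPlus B PySem.Dict.empty).keys = PySem.Set.ofList lb := by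
    rw [pv_keys_plus, PySem.Dict.keys_empty, PySem.Set.update_nil_left]
  have hshape : evaluate_partition A B =
      ((PySem.Set.union (PySem.Set.ofList (pvPlus A PySem.Dict.empty).keys)
          (PySem.Set.ofList (pvPlus B PySem.Dict.empty).keys)).map
        (fun label => |(pvPlus A PySem.Dict.empty).getD label 0
                      - (pvPlus B PySem.Dict.empty).getD label 0|)).sum := rfl
  set U := PySem.Set.union (PySem.Set.ofList (pvPlus A PySem.Dict.empty).keys)
      (PySem.Set.ofList (pvPlus B PySem.Dict.empty).keys) with hU
  have hUnodup : U.Nodup := by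
    rw [hU]
    exact PySem.Set.nodup_update _ _ (PySem.Set.nodup_ofList _)
  have hUmem : ∀ v, v ∈ U ↔ v ∈ la ∨ v ∈ lb := by
    intro v
    rw [hU]
    show v ∈ PySem.Set.update _ _ ↔ _
    rw [hkA, hkB]
    simp [PySem.Set.mem_update, PySem.Set.mem_ofList]
  have hfun : ∀ v, |(pvPlus A PySem.Dict.empty).getD v 0 - (pvPlus B PySem.Dict.empty).getD v 0|
      = |(la.count v : Int) - (lb.count v : Int)| := by
    intro v; rw [pv_getD_plus, pv_getD_plus]; simp [hla, hlb]
  rw [hshape, List.map_congr_left (fun v _ => hfun v), pv_sum_map_nodup U hUnodup]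
  have hset : U.toFinset = ((la ++ lb).toFinset) := by
    apply Finset.ext; intro v
    simp [List.mem_toFinset, hUmem v]
  rw [hset]
  -- now strip the injective prefix
  have hcat : la ++ lb = (pvRaw A ++ pvRaw B).map (fun h => "abn_" ++ h) := by
    rw [hla, hlb, hlab, hlab, List.map_append]
  have himg : ((pvRaw A ++ pvRaw B).map (fun h => "abn_" ++ h)).toFinset
      = (pvRaw A ++ pvRaw B).toFinset.image (fun h => "abn_" ++ h) := by
    apply Finset.ext; intro v
    simp only [List.mem_toFinset, Finset.mem_image, List.mem_map, List.mem_append]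
  rw [hcat, himg, Finset.sum_image (fun x _ y _ hxy => pv_prefix_inj hxy)]
  refine Finset.sum_congr rfl (fun v _ => ?_)
  rw [hla, hlb, hlab, hlab,
    List.count_map_of_injective _ _ pv_prefix_inj,
    List.count_map_of_injective _ _ pv_prefix_inj]

-- the matching loop computes the same Finset sum
theorem pv_match (M : List String) : ∀ (pool : List String) (imb : Int),
    (M.foldl pvStep (imb, pool)).1 + (((M.foldl pvStep (imb, pool)).2.length : Int))
      = imb + ∑ v ∈ (pool ++ M).toFinset, |(pool.count v : Int) - (M.count v : Int)| := by
  induction M with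
  | nil =>
    intro pool imb
    simp only [List.foldl_nil, List.append_nil, List.count_nil, Nat.cast_zero, sub_zero]
    have h1 : ∑ v ∈ pool.toFinset, |(pool.count v : Int)|
        = ∑ v ∈ pool.toFinset, ((pool.count v : Nat) : Int) :=
      Finset.sum_congr rfl (fun v _ => abs_of_nonneg (by positivity))
    have h2 : ∑ v ∈ pool.toFinset, pool.count v = pool.length := by
      simp
    rw [h1, ← Nat.cast_sum, h2]
  | cons x M ih =>
    intro pool imb
    by_cases hx : x ∈ pool
    · simp only [List.foldl_cons, pvStep, if_pos hx]
      rw [ih]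
      congr 1
      -- sums over erased pool / smaller list equal the big one
      have hsub : (pool.erase x ++ M).toFinset ⊆ (pool ++ x :: M).toFinset := by
        intro v hv
        simp only [List.toFinset_append, Finset.mem_union, List.mem_toFinset] at hv ⊢
        rcases hv with hv | hv
        · exact Or.inl (List.mem_of_mem_erase hv)
        · exact Or.inr (List.mem_cons_of_mem _ hv)
      have hcount : 1 ≤ pool.count x := List.count_pos_iff.mpr hx
      have hpt : ∀ v, |((pool.erase x).count v : Int) - (M.count v : Int)|
          = |(pool.count v : Int) - ((x :: M).count v : Int)| := by
        intro v
        by_cases hv : v = x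
        · subst hv
          rw [List.count_erase_self, List.count_cons_self]
          have : (((pool.count v - 1 : Nat)) : Int) = (pool.count v : Int) - 1 := by
            omega
          rw [this]
          push_cast
          congr 1
          ring
        · rw [List.count_erase_of_ne hv, List.count_cons_of_ne (fun h => hv h.symm)]
      have hzero : ∀ v ∈ (pool ++ x :: M).toFinset, v ∉ (pool.erase x ++ M).toFinset →
          |((pool.erase x).count v : Int) - (M.count v : Int)| = 0 := by
        intro v _ hv
        simp only [List.toFinset_append, Finset.mem_union, List.mem_toFinset, not_or] at hv
        rcases hv with ⟨hv1, hv2⟩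
        rw [List.count_eq_zero_of_not_mem hv1, List.count_eq_zero_of_not_mem hv2]
        simp
      calc ∑ v ∈ (pool.erase x ++ M).toFinset, |((pool.erase x).count v : Int) - (M.count v : Int)|
          = ∑ v ∈ (pool ++ x :: M).toFinset, |((pool.erase x).count v : Int) - (M.count v : Int)| :=
            Finset.sum_subset hsub hzero
        _ = ∑ v ∈ (pool ++ x :: M).toFinset, |(pool.count v : Int) - ((x :: M).count v : Int)| :=
            Finset.sum_congr rfl (fun v _ => hpt v)
    · simp only [List.foldl_cons, pvStep, if_neg hx]
      rw [ih]
      have hx0 : pool.count x = 0 := List.count_eq_zero_of_not_mem hx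
      have hpt : ∀ v ∈ (pool ++ x :: M).toFinset,
          |(pool.count v : Int) - ((x :: M).count v : Int)|
            = |(pool.count v : Int) - (M.count v : Int)| + (if v = x then 1 else 0) := by
        intro v _
        by_cases hv : v = x
        · subst hv
          rw [hx0, List.count_cons_self]
          simp only [Nat.cast_zero, zero_sub, abs_neg]
          rw [abs_of_nonneg (by positivity), abs_of_nonneg (by positivity)]
          push_cast; ring
        · rw [List.count_cons_of_ne (fun h => hv h.symm), if_neg hv, add_zero]
      have hxT : x ∈ (pool ++ x :: M).toFinset := by
        simp [List.toFinset_append]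
      have hsub : (pool ++ M).toFinset ⊆ (pool ++ x :: M).toFinset := by
        intro v hv
        simp only [List.toFinset_append, Finset.mem_union, List.mem_toFinset] at hv ⊢
        rcases hv with hv | hv
        · exact Or.inl hv
        · exact Or.inr (List.mem_cons_of_mem _ hv)
      have hzero : ∀ v ∈ (pool ++ x :: M).toFinset, v ∉ (pool ++ M).toFinset →
          |(pool.count v : Int) - (M.count v : Int)| = 0 := by
        intro v _ hv
        simp only [List.toFinset_append, Finset.mem_union, List.mem_toFinset, not_or] at hv
        rcases hv with ⟨hv1, hv2⟩
        rw [List.count_eq_zero_of_not_mem hv1, List.count_eq_zero_of_not_mem hv2]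
        simp
      calc imb + 1 + ∑ v ∈ (pool ++ M).toFinset, |(pool.count v : Int) - (M.count v : Int)|
          = imb + 1 + ∑ v ∈ (pool ++ x :: M).toFinset, |(pool.count v : Int) - (M.count v : Int)| := by
            rw [Finset.sum_subset hsub hzero]
        _ = imb + (∑ v ∈ (pool ++ x :: M).toFinset,
              (|(pool.count v : Int) - (M.count v : Int)| + (if v = x then 1 else 0))) := by
            rw [Finset.sum_add_distrib, Finset.sum_ite_eq' _ x (fun _ => (1 : Int)), if_pos hxT]
            ring
        _ = imb + ∑ v ∈ (pool ++ x :: M).toFinset, |(pool.count v : Int) - ((x :: M).count v : Int)| := by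
            rw [Finset.sum_congr rfl hpt]

-- B's nested loops are the matching fold over the flattened id lists
theorem pv_alt_shape (A B : List (Int × List String)) :
    evaluate_partition_alt A B =
      ((pvRaw B).foldl pvStep ((0 : Int), pvRaw A)).1
        + ((((pvRaw B).foldl pvStep ((0 : Int), pvRaw A)).2.length : Int)) := by
  have hpool : A.foldl (fun pool p => pool ++ p.2) ([] : List String) = pvRaw A := by
    rw [PySem.List.foldl_append_eq_flatMap]; simp [pvRaw]
  have hfold : ∀ (st : Int × List String),
      B.foldl (fun st p => p.2.foldl pvStep st) st = (pvRaw B).foldl pvStep st := by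
    intro st
    induction B generalizing st with
    | nil => simp [pvRaw]
    | cons p B ih => simp [pvRaw, List.flatMap_cons, List.foldl_append, ih]
  show (B.foldl (fun st p => p.2.foldl (fun st h =>
      if h ∈ st.2 then (st.1, st.2.erase h) else (st.1 + 1, st.2)) st)
      ((0 : Int), A.foldl (fun pool p => pool ++ p.2) ([] : List String))).1 + _ = _
  rw [hpool]
  have : (fun (st : Int × List String) (h : String) =>
      if h ∈ st.2 then (st.1, st.2.erase h) else (st.1 + 1, st.2)) = pvStep := rfl
  rw [this, hfold]

theorem pv_final (A B : List (Int × List String)) :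
    evaluate_partition A B = evaluate_partition_alt A B := by
  rw [pv_A_sum, pv_alt_shape, pv_match]
  ring

-- ===== VERDICT (by name: the statement is the Claim_ definition above) =====
theorem evaluate_partition_spec : Claim_equal_evaluate_partition := by
  intro A B _
  exact pv_final A B
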